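-- pv_equiv track=rewrite | github.com/tyler-fishbone/data-structures-and-algorithms | challenges/shift-list/shift_list.py | insert_shift_list
-- ===== SOURCE A (Python) =====
-- def insert_shift_list(list_input, val):
--     list_output = []
--     list_midpoint = len(list_input) // 2
--     for i in range(len(list_input) + 1):
--         if i < list_midpoint:
--             list_output += [list_input[i]]
--         elif i == list_midpoint:
--             list_output += [val]
--         else:
--             list_output += [list_input[i - 1]]
--     return list_output
-- ===== SOURCE B (Python) =====
-- def insert_shift_list(list_input, val):
--     mid = len(list_input) // 2
--     return list_input[:mid] + [val] + list_input[mid:]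
-- ===== Notes on version B (the rewrite author's own statement) =====
-- stated objective: simpler
-- what changed: Replaces the index loop with its three-way branch and per-element appends by a single slice-concatenation expression list_input[:mid] + [val] + list_input[mid:].
import Mathlib
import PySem

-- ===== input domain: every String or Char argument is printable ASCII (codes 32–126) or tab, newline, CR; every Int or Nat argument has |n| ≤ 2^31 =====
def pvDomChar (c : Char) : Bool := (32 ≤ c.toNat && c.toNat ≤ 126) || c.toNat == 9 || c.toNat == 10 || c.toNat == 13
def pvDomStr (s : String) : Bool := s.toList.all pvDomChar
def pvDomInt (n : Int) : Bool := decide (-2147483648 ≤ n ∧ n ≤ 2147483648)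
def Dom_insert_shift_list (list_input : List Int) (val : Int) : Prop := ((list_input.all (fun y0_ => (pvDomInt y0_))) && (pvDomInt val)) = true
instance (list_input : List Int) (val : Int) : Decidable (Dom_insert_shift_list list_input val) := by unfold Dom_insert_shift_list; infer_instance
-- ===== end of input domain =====

-- B builds the result as one slice-concatenation instead of A's index loop; equivalence of the return values is proved on all inputs.

-- ===== PORT A =====
-- literal port of A: loop over range(len(list_input)+1) with the three-way branch,
-- appending one element per iteration (indices are always in range, so pyGetD's
-- default 0 is never used).
def insert_shift_list (list_input : List Int) (val : Int) : List Int :=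
  let list_midpoint := PySem.Int.floordiv (PySem.List.len list_input) 2
  (PySem.List.pyRange 0 (PySem.List.len list_input + 1) 1).foldl
    (fun list_output i =>
      if i < list_midpoint then
        list_output ++ [PySem.List.pyGetD list_input i 0]
      else if i = list_midpoint then
        list_output ++ [val]
      else
        list_output ++ [PySem.List.pyGetD list_input (i - 1) 0]) []

-- ===== PORT B =====
-- literal port of B: list_input[:mid] + [val] + list_input[mid:]
def insert_shift_list_alt (list_input : List Int) (val : Int) : List Int :=
  let mid := PySem.Int.floordiv (PySem.List.len list_input) 2
  PySem.List.slice list_input none (some mid) ++ [val] ++ PySem.List.slice list_input (some mid) none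

-- ===== PRECONDITION & SPEC =====
def Spec_insert_shift_list (list_input : List Int) (val : Int) (out : List Int) : Prop := out = insert_shift_list_alt list_input val
instance (list_input : List Int) (val : Int) (out : List Int) : Decidable (Spec_insert_shift_list list_input val out) := by unfold Spec_insert_shift_list; infer_instance

-- ===== CLAIM (what is proved, stated in full; the proofs are below) =====
def Claim_equal_insert_shift_list : Prop := ∀ (list_input : List Int) (val : Int), Dom_insert_shift_list list_input val → Spec_insert_shift_list list_input val (insert_shift_list list_input val)

-- ===== LEMMAS AND PROOFS =====

-- prefix of A's loop: indices 0..m-1 read list_input[i], producing take m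
lemma map_pyGetD_range_take (xs : List Int) (d : Int) :
    ∀ m : Nat, m ≤ xs.length →
      (PySem.List.pyRange 0 (m : Int) 1).map (fun j => PySem.List.pyGetD xs j d) = xs.take m := by
  intro m
  induction m with
  | zero => intro _; simp
  | succ m ih =>
    intro h
    have h1 : (0 : Int) ≤ (m : Int) := by exact_mod_cast Nat.zero_le m
    have : ((m : Int) + 1) = ((m + 1 : Nat) : Int) := by push_cast; ring
    rw [← this, PySem.List.pyRange_one_succ_right h1, List.map_append, ih (by omega)]
    have hm : m < xs.length := by omega
    simp only [List.map_cons, List.map_nil, PySem.List.pyGetD_natCast]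
    rw [List.take_add_one]
    simp [List.getD_eq_getElem?_getD, List.getElem?_eq_getElem hm]

-- suffix of A's loop: indices mid+1..n read list_input[i-1], producing drop mid
lemma map_pyGetD_range_shift_drop (xs : List Int) (d : Int) (m : Nat) (hm : m ≤ xs.length) :
    (PySem.List.pyRange ((m : Int) + 1) ((xs.length : Int) + 1) 1).map
        (fun j => PySem.List.pyGetD xs (j - 1) d) = xs.drop m := by
  have h := PySem.List.map_pyGetD_pyRange xs d (a := (m : Int)) (by exact_mod_cast Nat.zero_le m)
  simp only [PySem.List.len, Int.toNat_natCast] at h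
  rw [PySem.List.pyRange_one] at h ⊢
  have hlen : ((xs.length : Int) + 1 - ((m : Int) + 1)).toNat = ((xs.length : Int) - (m : Int)).toNat := by omega
  have hfun : ((fun j => PySem.List.pyGetD xs (j - 1) d) ∘ fun k : Nat => (m : Int) + 1 + (k : Int))
       = ((fun j => PySem.List.pyGetD xs j d) ∘ fun k : Nat => (m : Int) + (k : Int)) := by
    funext k; simp [Function.comp]; ring_nf
  rw [hlen, List.map_map, hfun, ← List.map_map]
  exact h

theorem insert_shift_list_eq (xs : List Int) (val : Int) :
    insert_shift_list xs val = xs.take (xs.length / 2) ++ [val] ++ xs.drop (xs.length / 2) := by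
  unfold insert_shift_list
  have hmid : PySem.Int.floordiv ((xs.length : Int)) 2 = ((xs.length / 2 : Nat) : Int) :=
    PySem.Int.floordiv_natCast xs.length 2
  set m : Nat := xs.length / 2 with hm
  have hm_le : m ≤ xs.length := Nat.div_le_self _ _
  have h0m : (0 : Int) ≤ (m : Int) := by exact_mod_cast Nat.zero_le m
  have hmn : (m : Int) ≤ (xs.length : Int) + 1 := by
    have := hm_le; omega
  have hmn1 : (m : Int) + 1 ≤ (xs.length : Int) + 1 := by
    have := hm_le; omega
  simp only [PySem.List.len, hmid]
  set f : List Int → Int → List Int := fun list_output i =>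
    if i < (m : Int) then list_output ++ [PySem.List.pyGetD xs i 0]
    else if i = (m : Int) then list_output ++ [val]
    else list_output ++ [PySem.List.pyGetD xs (i - 1) 0] with hf
  rw [PySem.List.pyRange_one_append 0 (m : Int) ((xs.length : Int) + 1) h0m hmn,
      PySem.List.pyRange_one_append (m : Int) ((m : Int) + 1) ((xs.length : Int) + 1)
        (by omega) hmn1,
      PySem.List.pyRange_one_singleton]
  rw [List.foldl_append, List.foldl_append]
  -- first segment: all i < m read list_input[i]
  have hseg1 : (PySem.List.pyRange 0 (m : Int) 1).foldl f [] = xs.take m := by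
    rw [PySem.List.foldl_congr_mem (PySem.List.pyRange 0 (m : Int) 1) f
      (fun acc i => acc ++ [PySem.List.pyGetD xs i 0]) []
      (by intro acc i hi
          have := (PySem.List.mem_pyRange_one).mp hi
          simp [hf, if_pos this.2])]
    rw [PySem.List.foldl_append_singleton_eq_map]
    simpa using map_pyGetD_range_take xs 0 m hm_le
  rw [hseg1]
  -- middle step: i = m appends val
  have hmidstep : List.foldl f (xs.take m) [(m : Int)] = xs.take m ++ [val] := by
    simp [hf]
  rw [hmidstep]
  -- last segment: all i > m read list_input[i-1]
  rw [PySem.List.foldl_congr_mem (PySem.List.pyRange ((m : Int) + 1) ((xs.length : Int) + 1) 1) f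
    (fun acc i => acc ++ [PySem.List.pyGetD xs (i - 1) 0]) (xs.take m ++ [val])
    (by intro acc i hi
        have h := (PySem.List.mem_pyRange_one).mp hi
        have h1 : ¬ i < (m : Int) := by omega
        have h2 : i ≠ (m : Int) := by omega
        simp [hf, h1, h2])]
  rw [PySem.List.foldl_append_singleton_eq_map]
  rw [map_pyGetD_range_shift_drop xs 0 m hm_le]

theorem insert_shift_list_alt_eq (xs : List Int) (val : Int) :
    insert_shift_list_alt xs val = xs.take (xs.length / 2) ++ [val] ++ xs.drop (xs.length / 2) := by
  unfold insert_shift_list_alt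
  have hmid : PySem.Int.floordiv ((xs.length : Int)) 2 = ((xs.length / 2 : Nat) : Int) :=
    PySem.Int.floordiv_natCast xs.length 2
  simp only [PySem.List.len, hmid]
  rw [PySem.List.slice_to_natCast, PySem.List.slice_from_natCast]

-- ===== VERDICT (by name: the statement is the Claim_ definition above) =====
theorem insert_shift_list_spec : Claim_equal_insert_shift_list := by
  intro xs val _
  unfold Spec_insert_shift_list
  rw [insert_shift_list_eq, insert_shift_list_alt_eq]
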